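-- pv_equiv track=rewrite | github.com/Shannu26/CS-667 | Assignment 2/Assignment2.py | mapFitnessToRank
-- ===== SOURCE A (Python) =====
-- def mapFitnessToRank(population):
-- 	fitnessToRankMapping = {}
-- 	population = sorted(population, key = lambda row: -row[1])
-- 	for index in range(len(population)):
-- 		if population[index][1] not in fitnessToRankMapping:
-- 			fitnessToRankMapping[population[index][1]] = [index + 1, 0]
-- 		fitnessToRankMapping[population[index][1]][1] += 1
-- 	return fitnessToRankMapping
-- ===== SOURCE B (Python) =====
-- def mapFitnessToRank(population):
--     counts = {}
--     for row in population:
--         counts[row[1]] = counts.get(row[1], 0) + 1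
--     mapping = {}
--     rank = 1
--     for fitness in sorted(counts, key=lambda v: -v):
--         mapping[fitness] = [rank, counts[fitness]]
--         rank += counts[fitness]
--     return mapping
-- ===== Notes on version B (the rewrite author's own statement) =====
-- stated objective: alternative
-- what changed: A sorts the whole population by descending fitness and scans it with indices to record first-appearance ranks; B never sorts the population: it builds a fitness-frequency dict in one pass, then walks only the distinct fitness values in descending order keeping a running rank.
import Mathlib
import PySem

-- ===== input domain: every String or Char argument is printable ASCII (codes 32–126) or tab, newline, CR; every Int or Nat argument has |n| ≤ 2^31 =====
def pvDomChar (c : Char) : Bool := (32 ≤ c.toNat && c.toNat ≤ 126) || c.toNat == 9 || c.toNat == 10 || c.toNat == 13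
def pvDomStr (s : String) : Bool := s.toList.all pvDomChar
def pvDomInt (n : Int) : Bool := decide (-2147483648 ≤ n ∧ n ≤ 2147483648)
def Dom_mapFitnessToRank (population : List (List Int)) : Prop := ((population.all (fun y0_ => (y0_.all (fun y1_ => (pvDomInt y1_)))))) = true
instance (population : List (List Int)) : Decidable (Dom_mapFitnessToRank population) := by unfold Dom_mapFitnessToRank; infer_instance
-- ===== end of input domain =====

-- B replaces A's sort-the-whole-population-then-scan by a frequency count plus a walk over the
-- distinct fitness values in descending order with a running rank (alternative decomposition).

-- ===== PORT A =====
def mapFitnessToRank (population : List (List Int)) : List (Int × List Int) :=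
  let pop := PySem.List.sorted population (fun row => -(PySem.List.pyGetD row 1 0))
  ((PySem.List.pyRange 0 (PySem.List.len pop)).foldl
    (fun (d : PySem.Dict Int (List Int)) index =>
      let d1 := if d.contains (PySem.List.pyGetD (PySem.List.pyGetD pop index []) 1 0) then d
                else d.insert (PySem.List.pyGetD (PySem.List.pyGetD pop index []) 1 0) [index + 1, 0]
      d1.modify (PySem.List.pyGetD (PySem.List.pyGetD pop index []) 1 0) []
        (fun v => PySem.List.pySetD v 1 (PySem.List.pyGetD v 1 0 + 1)))
    PySem.Dict.empty).items

-- ===== PORT B =====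
def mapFitnessToRank_alt (population : List (List Int)) : List (Int × List Int) :=
  let counts : PySem.Dict Int Int :=
    population.foldl (fun d row =>
      d.insert (PySem.List.pyGetD row 1 0) (d.getD (PySem.List.pyGetD row 1 0) 0 + 1))
      PySem.Dict.empty
  ((PySem.List.sorted counts.keys (fun v => -v)).foldl
    (fun (st : PySem.Dict Int (List Int) × Int) f =>
      (st.1.insert f [st.2, counts.getD f 0], st.2 + counts.getD f 0))
    (PySem.Dict.empty, 1)).1.items

-- ===== PRECONDITION & SPEC =====
-- Python A evaluates row[1] for every row, so it raises IndexError on any row of length < 2;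
-- exactly those inputs are excluded.
def Pre_mapFitnessToRank (population : List (List Int)) : Prop := ∀ row ∈ population, 2 ≤ row.length
instance (population : List (List Int)) : Decidable (Pre_mapFitnessToRank population) := by unfold Pre_mapFitnessToRank; infer_instance
def pvWitness_mapFitnessToRank : List (List Int) := [[0, 1], [2, 3], [4, 1]]

def Spec_mapFitnessToRank (population : List (List Int)) (out : List (Int × List Int)) : Prop := out = mapFitnessToRank_alt population
instance (population : List (List Int)) (out : List (Int × List Int)) : Decidable (Spec_mapFitnessToRank population out) := by unfold Spec_mapFitnessToRank; infer_instance

-- ===== CLAIM (what is proved, stated in full; the proofs are below) =====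
def Claim_equal_mapFitnessToRank : Prop := ∀ (population : List (List Int)), Dom_mapFitnessToRank population → Pre_mapFitnessToRank population → Spec_mapFitnessToRank population (mapFitnessToRank population)

-- ===== LEMMAS AND PROOFS =====

-- A's loop body, on (index, fitness) pairs.
def pvAStep (d : PySem.Dict Int (List Int)) (p : Int × Int) : PySem.Dict Int (List Int) :=
  let d1 := if d.contains p.2 then d else d.insert p.2 [p.1 + 1, 0]
  d1.modify p.2 [] (fun v => PySem.List.pySetD v 1 (PySem.List.pyGetD v 1 0 + 1))

-- B's rank walk as a recursive function.
def pvBuild (cnt : Int → Int) : List Int → Int → List (Int × List Int)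
  | [], _ => []
  | k :: t, r => (k, [r, cnt k]) :: pvBuild cnt t (r + cnt k)

lemma pvEnum_map (g : List Int → Int) (xs : List (List Int)) (s : Int) :
    PySem.List.enumerate (xs.map g) s = (PySem.List.enumerate xs s).map (fun p => (p.1, g p.2)) := by
  induction xs generalizing s with
  | nil => simp [PySem.List.enumerate_nil]
  | cons x t ih => simp [PySem.List.enumerate_cons, ih]

lemma pvA_as_enum (population : List (List Int)) :
    mapFitnessToRank population
      = ((PySem.List.enumerate (((PySem.List.sorted population (fun row => -(PySem.List.pyGetD row 1 0))).map (fun row => PySem.List.pyGetD row 1 0))) 0).foldl pvAStep PySem.Dict.empty).items := by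
  rw [pvEnum_map, PySem.List.enumerate_eq_map_pyRange _ ([] : List Int), List.foldl_map, List.foldl_map]
  rfl

lemma pvAKeys (gs : List Int) : ∀ (s : Int) (d : PySem.Dict Int (List Int)),
    ((PySem.List.enumerate gs s).foldl pvAStep d).keys = gs.foldl PySem.Set.add d.keys := by
  induction gs with
  | nil => intro s d; simp [PySem.List.enumerate_nil]
  | cons x t ih =>
    intro s d
    rw [PySem.List.enumerate_cons, List.foldl_cons, List.foldl_cons, ih]
    congr 1
    by_cases hc : d.contains x = true
    · simp only [pvAStep, hc, if_true]
      rw [PySem.Dict.keys_modify, PySem.Dict.keys_insert_of_contains _ _ hc]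
      have hx : x ∈ d.keys := (PySem.Dict.contains_iff_mem_keys d x).mp hc
      simp [PySem.Set.add, hx]
    · rw [Bool.not_eq_true] at hc
      have hstep : pvAStep d (s, x)
          = (d.insert x [s + 1, 0]).modify x [] (fun v => PySem.List.pySetD v 1 (PySem.List.pyGetD v 1 0 + 1)) := by
        simp [pvAStep, hc]
      rw [hstep, PySem.Dict.keys_modify,
        PySem.Dict.keys_insert_of_contains _ _ (PySem.Dict.contains_insert_self _ x _),
        PySem.Dict.keys_insert_of_not_contains _ _ hc]
      have hx : x ∉ d.keys := fun hm => by
        rw [(PySem.Dict.contains_iff_mem_keys d x).mpr hm] at hc; simp at hc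
      simp [PySem.Set.add, hx]

lemma pvAVal_contains (gs : List Int) : ∀ (s : Int) (d : PySem.Dict Int (List Int)) (k r c : Int),
    d.contains k = true → d.getD k [] = [r, c] →
    ((PySem.List.enumerate gs s).foldl pvAStep d).getD k [] = [r, c + (gs.count k : Int)] := by
  induction gs with
  | nil => intro s d k r c _ hv; simpa [PySem.List.enumerate_nil] using hv
  | cons x t ih =>
    intro s d k r c hc hv
    rw [PySem.List.enumerate_cons, List.foldl_cons]
    by_cases hx : x = k
    · subst hx
      have hstep : pvAStep d (s, x) = d.modify x [] (fun v => PySem.List.pySetD v 1 (PySem.List.pyGetD v 1 0 + 1)) := by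
        simp [pvAStep, hc]
      rw [hstep]
      have hc' : (d.modify x [] (fun v => PySem.List.pySetD v 1 (PySem.List.pyGetD v 1 0 + 1))).contains x = true := by
        rw [PySem.Dict.contains_modify]; simp
      have hv' : (d.modify x [] (fun v => PySem.List.pySetD v 1 (PySem.List.pyGetD v 1 0 + 1))).getD x [] = [r, c + 1] := by
        rw [PySem.Dict.getD_modify_self, hv]; rfl
      rw [ih (s + 1) _ x r (c + 1) hc' hv']
      have : ((x :: t).count x : Int) = (t.count x : Int) + 1 := by
        rw [List.count_cons_self]; push_cast; ring
      rw [this]; ring_nf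
    · have hne : k ≠ x := fun h => hx h.symm
      have hd1c : (if d.contains x = true then d else d.insert x [s + 1, 0]).contains k = d.contains k := by
        split_ifs with hcx
        · rfl
        · rw [PySem.Dict.contains_insert]; simp [hne]
      have hd1g : (if d.contains x = true then d else d.insert x [s + 1, 0]).getD k [] = d.getD k [] := by
        split_ifs with hcx
        · rfl
        · exact PySem.Dict.getD_insert_of_ne _ _ _ hne
      have hstep1 : (pvAStep d (s, x)).contains k = d.contains k := by
        simp only [pvAStep]
        rw [PySem.Dict.contains_modify, hd1c]
        simp [hne]
      have hstep2 : (pvAStep d (s, x)).getD k [] = d.getD k [] := by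
        simp only [pvAStep]
        rw [PySem.Dict.getD_modify_of_ne _ _ _ hne, hd1g]
      rw [ih (s + 1) _ k r c (hstep1 ▸ hc) (hstep2 ▸ hv), List.count_cons_of_ne hne.symm]

lemma pvAVal_new (gs : List Int) : ∀ (s : Int) (d : PySem.Dict Int (List Int)) (k : Int),
    d.contains k = false → k ∈ gs →
    ((PySem.List.enumerate gs s).foldl pvAStep d).getD k [] = [s + (gs.idxOf k : Int) + 1, (gs.count k : Int)] := by
  induction gs with
  | nil => intro _ _ _ _ h; cases h
  | cons x t ih =>
    intro s d k hc hk
    rw [PySem.List.enumerate_cons, List.foldl_cons]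
    by_cases hx : x = k
    · subst hx
      have hstep : pvAStep d (s, x)
          = (d.insert x [s + 1, 0]).modify x [] (fun v => PySem.List.pySetD v 1 (PySem.List.pyGetD v 1 0 + 1)) := by
        simp [pvAStep, hc]
      rw [hstep]
      have hc' : ((d.insert x [s + 1, 0]).modify x [] (fun v => PySem.List.pySetD v 1 (PySem.List.pyGetD v 1 0 + 1))).contains x = true := by
        rw [PySem.Dict.contains_modify]; simp
      have hv' : ((d.insert x [s + 1, 0]).modify x [] (fun v => PySem.List.pySetD v 1 (PySem.List.pyGetD v 1 0 + 1))).getD x [] = [s + 1, 1] := by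
        rw [PySem.Dict.getD_modify_self, PySem.Dict.getD_insert_self]; rfl
      rw [pvAVal_contains t (s + 1) _ x (s + 1) 1 hc' hv']
      have h1 : ((x :: t).idxOf x : Int) = 0 := by simp
      have h2 : ((x :: t).count x : Int) = 1 + (t.count x : Int) := by
        rw [List.count_cons_self]; push_cast; ring
      rw [h1, h2]; ring_nf
    · have hne : k ≠ x := fun h => hx h.symm
      have hkt : k ∈ t := by cases hk with | head => exact absurd rfl hx | tail _ h => exact h
      have hd1c : (if d.contains x = true then d else d.insert x [s + 1, 0]).contains k = d.contains k := by
        split_ifs with hcx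
        · rfl
        · rw [PySem.Dict.contains_insert]; simp [hne]
      have hd1g : (if d.contains x = true then d else d.insert x [s + 1, 0]).getD k [] = d.getD k [] := by
        split_ifs with hcx
        · rfl
        · exact PySem.Dict.getD_insert_of_ne _ _ _ hne
      have hstep1 : (pvAStep d (s, x)).contains k = d.contains k := by
        simp only [pvAStep]
        rw [PySem.Dict.contains_modify, hd1c]
        simp [hne]
      have hstep2 : (pvAStep d (s, x)).getD k [] = d.getD k [] := by
        simp only [pvAStep]
        rw [PySem.Dict.getD_modify_of_ne _ _ _ hne, hd1g]
      rw [ih (s + 1) _ k (hstep1 ▸ hc) hkt]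
      have h1n : (x :: t).idxOf k = t.idxOf k + 1 := by simp [hx]
      have h1 : (((x :: t).idxOf k : Nat) : Int) = (t.idxOf k : Int) + 1 := by
        rw [h1n]; push_cast; ring
      rw [h1, List.count_cons_of_ne hne.symm]
      ring_nf

lemma pvBCounts (population : List (List Int)) :
    population.foldl (fun d row =>
        d.insert (PySem.List.pyGetD row 1 0) (d.getD (PySem.List.pyGetD row 1 0) 0 + 1))
      PySem.Dict.empty
    = PySem.Dict.counter (population.map (fun row => PySem.List.pyGetD row 1 0)) := by
  rw [← PySem.Dict.foldl_insert_getD_add_one_eq_counter, List.foldl_map]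

lemma pvBFold (cnt : Int → Int) : ∀ (ks : List Int) (d : PySem.Dict Int (List Int)) (r : Int),
    (∀ k ∈ ks, d.contains k = false) → ks.Nodup →
    (((ks.foldl (fun (st : PySem.Dict Int (List Int) × Int) f =>
        (st.1.insert f [st.2, cnt f], st.2 + cnt f)) (d, r))).1).items
      = d.items ++ pvBuild cnt ks r := by
  intro ks
  induction ks with
  | nil => intro d r _ _; simp [pvBuild]
  | cons k t ih =>
    intro d r hfresh hnd
    rw [List.foldl_cons]
    have hfr : ∀ j ∈ t, (d.insert k [r, cnt k]).contains j = false := by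
      intro j hj
      rw [PySem.Dict.contains_insert]
      have hjk : j ≠ k := fun h => (List.nodup_cons.mp hnd).1 (h ▸ hj)
      simp [hjk, hfresh j (List.mem_cons_of_mem _ hj)]
    rw [ih _ _ hfr (List.nodup_cons.mp hnd).2,
      PySem.Dict.items_insert_of_not_contains _ _ (hfresh k (List.mem_cons_self))]
    simp [pvBuild]

lemma pvBuild_congr (c1 c2 : Int → Int) : ∀ (ks : List Int) (r : Int),
    (∀ k ∈ ks, c1 k = c2 k) → pvBuild c1 ks r = pvBuild c2 ks r := by
  intro ks
  induction ks with
  | nil => intro r _; rfl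
  | cons k t ih =>
    intro r h
    have hk := h k (List.mem_cons_self)
    simp only [pvBuild, hk]
    rw [ih _ (fun j hj => h j (List.mem_cons_of_mem _ hj))]

lemma pvOfList_sublist (l : List Int) : (PySem.Set.ofList l).Sublist l := by
  have aux : ∀ (xs s : List Int), ∃ t, List.foldl PySem.Set.add s xs = s ++ t ∧ t.Sublist xs := by
    intro xs
    induction xs with
    | nil => exact fun s => ⟨[], by simp, by simp⟩
    | cons x xs ih =>
      intro s
      by_cases hc : PySem.Set.contains s x = true
      · have hmem : x ∈ s := by simpa [PySem.Set.contains] using hc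
        have hadd : PySem.Set.add s x = s := by simp [PySem.Set.add, hmem]
        obtain ⟨t, ht, hs⟩ := ih s
        exact ⟨t, by rw [List.foldl_cons, hadd, ht], hs.cons x⟩
      · have hmem : x ∉ s := by simpa [PySem.Set.contains] using hc
        have hadd : PySem.Set.add s x = s ++ [x] := by simp [PySem.Set.add, hmem]
        obtain ⟨t, ht, hs⟩ := ih (s ++ [x])
        refine ⟨x :: t, ?_, hs.cons₂ x⟩
        rw [List.foldl_cons, hadd, ht, List.append_assoc]
        rfl
  obtain ⟨t, ht, hs⟩ := aux l []
  rw [PySem.Set.ofList_eq_foldl, ht]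
  simpa using hs

lemma pvIdx (gs : List Int) (hdesc : gs.Pairwise (fun a b : Int => b ≤ a)) :
    ∀ k ∈ gs, gs.idxOf k = gs.countP (fun x => decide (k < x)) := by
  induction gs with
  | nil => intro _ h; cases h
  | cons x t ih =>
    intro k hk
    have hx : ∀ y ∈ t, y ≤ x := fun y hy => (List.pairwise_cons.mp hdesc).1 y hy
    by_cases hxk : x = k
    · subst hxk
      have h0 : t.countP (fun y => decide (x < y)) = 0 :=
        List.countP_eq_zero.mpr (fun y hy => by simpa using not_lt.mpr (hx y hy))
      simp [h0]
    · have hkt : k ∈ t := by cases hk with | head => exact absurd rfl hxk | tail _ h => exact h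
      have hkx : k < x := lt_of_le_of_ne (hx k hkt) (fun h => hxk h.symm)
      have h1 : (x :: t).idxOf k = t.idxOf k + 1 := by simp [hxk]
      rw [h1, ih (List.pairwise_cons.mp hdesc).2 k hkt]
      rw [List.countP_cons_of_pos (by simpa using hkx)]
  
lemma pvCountSplit (gs : List Int) (k k' : Int)
    (h : ∀ x ∈ gs, (k' < x ↔ (k < x ∨ x = k))) :
    gs.countP (fun x => decide (k' < x)) = gs.countP (fun x => decide (k < x)) + gs.count k := by
  induction gs with
  | nil => rfl
  | cons x t ih =>
    have hx := h x List.mem_cons_self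
    have ht := fun y hy => h y (List.mem_cons_of_mem _ hy)
    simp only [List.countP_cons, List.count_cons, ih ht]
    by_cases h1 : x = k
    · have e1 : (decide (k' < x)) = true := by simp [hx.mpr (Or.inr h1)]
      have e2 : (decide (k < x)) = false := by simp [h1]
      have e3 : (x == k) = true := by simp [h1]
      rw [e1, e2, e3]
      simp
      omega
    · by_cases h2 : k < x
      · have e1 : (decide (k' < x)) = true := by simp [hx.mpr (Or.inl h2)]
        have e2 : (decide (k < x)) = true := by simp [h2]
        have e3 : (x == k) = false := by simp [h1]
        rw [e1, e2, e3]
        simp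
        omega
      · have h3 : ¬ k' < x := fun hh => by
          rcases hx.mp hh with h4 | h4
          · exact h2 h4
          · exact h1 h4
        have e1 : (decide (k' < x)) = false := by simp [h3]
        have e2 : (decide (k < x)) = false := by simp [h2]
        have e3 : (x == k) = false := by simp [h1]
        rw [e1, e2, e3]
        simp

lemma pvWalk (gs : List Int) : ∀ (t : List Int) (k : Int),
    ((k :: t).Pairwise (fun a b : Int => b < a)) → (∀ j ∈ (k :: t), j ∈ gs) →
    (∀ x ∈ gs, x ∈ (k :: t) ∨ k < x) →
    pvBuild (fun j => (gs.count j : Int)) (k :: t) (1 + (gs.countP (fun x => decide (k < x)) : Int))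
      = (k :: t).map (fun j => (j, [1 + (gs.countP (fun x => decide (j < x)) : Int), (gs.count j : Int)])) := by
  intro t
  induction t with
  | nil => intro k _ _ _; simp [pvBuild]
  | cons k' t ih =>
    intro k hdesc hmem hcov
    have hk'k : k' < k := (List.pairwise_cons.mp hdesc).1 k' List.mem_cons_self
    have htail : ∀ y ∈ k' :: t, y < k := (List.pairwise_cons.mp hdesc).1
    have htdesc : (k' :: t).Pairwise (fun a b : Int => b < a) := (List.pairwise_cons.mp hdesc).2
    have hsplit : gs.countP (fun x => decide (k' < x)) = gs.countP (fun x => decide (k < x)) + gs.count k := by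
      apply pvCountSplit
      intro x hx
      constructor
      · intro hlt
        by_cases h2 : k < x
        · exact Or.inl h2
        · by_cases h3 : x = k
          · exact Or.inr h3
          · rcases hcov x hx with hin | hgt
            · rcases List.mem_cons.mp hin with h5 | hin2
              · exact absurd h5 h3
              · have hxle : x ≤ k' := by
                  rcases List.mem_cons.mp hin2 with h6 | hin3
                  · exact le_of_eq h6
                  · exact le_of_lt ((List.pairwise_cons.mp htdesc).1 x hin3)
                exact absurd hlt (not_lt.mpr hxle)
            · exact absurd hgt h2
      · intro hor
        rcases hor with h2 | h2
        · exact lt_trans hk'k h2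
        · exact h2 ▸ hk'k
    have hr : 1 + (gs.countP (fun x => decide (k < x)) : Int) + (gs.count k : Int)
        = 1 + (gs.countP (fun x => decide (k' < x)) : Int) := by
      rw [hsplit]; push_cast; ring
    have hcov' : ∀ x ∈ gs, x ∈ (k' :: t) ∨ k' < x := by
      intro x hx
      rcases hcov x hx with hin | hgt
      · rcases List.mem_cons.mp hin with h5 | hin2
        · exact Or.inr (h5 ▸ hk'k)
        · exact Or.inl hin2
      · exact Or.inr (lt_trans hk'k hgt)
    have hmem' : ∀ j ∈ (k' :: t), j ∈ gs := fun j hj => hmem j (List.mem_cons_of_mem _ hj)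
    calc pvBuild (fun j => (gs.count j : Int)) (k :: k' :: t) (1 + (gs.countP (fun x => decide (k < x)) : Int))
        = (k, [1 + (gs.countP (fun x => decide (k < x)) : Int), (gs.count k : Int)])
            :: pvBuild (fun j => (gs.count j : Int)) (k' :: t) (1 + (gs.countP (fun x => decide (k' < x)) : Int)) := by
          simp only [pvBuild]; rw [hr]
      _ = _ := by rw [ih k' htdesc hmem' hcov']; rfl

lemma pvFinal (gs : List Int) (hdesc : gs.Pairwise (fun a b : Int => b ≤ a)) :
    ∀ (ks : List Int), ks.Pairwise (fun a b : Int => b < a) → (∀ k ∈ ks, k ∈ gs) → (∀ x ∈ gs, x ∈ ks) →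
    pvBuild (fun k => (gs.count k : Int)) ks 1
      = ks.map (fun k => (k, [(gs.idxOf k : Int) + 1, (gs.count k : Int)])) := by
  intro ks
  cases ks with
  | nil => intro _ _ _; rfl
  | cons k t =>
    intro hks hmem hcov
    have hzero : gs.countP (fun x => decide (k < x)) = 0 := by
      apply List.countP_eq_zero.mpr
      intro x hx
      rcases List.mem_cons.mp (hcov x hx) with h5 | hin
      · simp only [decide_eq_true_eq]; omega
      · have h6 : x < k := (List.pairwise_cons.mp hks).1 x hin
        simp only [decide_eq_true_eq]; omega
    have hstart : pvBuild (fun j => (gs.count j : Int)) (k :: t) 1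
        = pvBuild (fun j => (gs.count j : Int)) (k :: t)
            (1 + (gs.countP (fun x => decide (k < x)) : Int)) := by
      rw [hzero]; norm_num
    rw [hstart, pvWalk gs t k hks hmem (fun x hx => Or.inl (hcov x hx))]
    apply List.map_congr_left
    intro j hj
    have hjg : j ∈ gs := hmem j hj
    rw [pvIdx gs hdesc j hjg]
    simp [add_comm]

theorem pvMain (population : List (List Int)) :
    mapFitnessToRank population = mapFitnessToRank_alt population := by
  have hdescS := PySem.List.sorted_pairwise population (fun row => -(PySem.List.pyGetD row 1 0))
  set sp := PySem.List.sorted population (fun row => -(PySem.List.pyGetD row 1 0)) with hsp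
  set fs := population.map (fun row => PySem.List.pyGetD row 1 0) with hfs
  set gs := sp.map (fun row => PySem.List.pyGetD row 1 0) with hgs
  set ks := PySem.List.sorted (PySem.Set.ofList fs) (fun v : Int => -v) with hks
  have hpermg : gs.Perm fs := (PySem.List.sorted_perm population _ false).map _
  have hdesc : gs.Pairwise (fun a b : Int => b ≤ a) := by
    rw [hgs]
    exact List.pairwise_map.mpr (hdescS.imp (fun h => neg_le_neg_iff.mp h))
  have hgt : (PySem.Set.ofList gs).Pairwise (fun a b : Int => b < a) :=
    (((hdesc.sublist (pvOfList_sublist gs))).and (PySem.Set.nodup_ofList gs)).imp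
      (fun h => lt_of_le_of_ne h.1 (Ne.symm h.2))
  have hksnd : ks.Nodup := (PySem.List.sorted_perm _ _ false).symm.nodup (PySem.Set.nodup_ofList fs)
  have hksdesc : ks.Pairwise (fun a b : Int => b < a) :=
    ((PySem.List.sorted_pairwise (PySem.Set.ofList fs) (fun v : Int => -v)).imp
        (fun h => neg_le_neg_iff.mp h) |>.and hksnd).imp
      (fun h => lt_of_le_of_ne h.1 (Ne.symm h.2))
  have hkeyeq : PySem.Set.ofList gs = ks := by
    rw [hks]
    refine (PySem.List.sorted_eq_of_perm_of_pairwise_lt _ _ _ ?_ ?_).symm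
    · exact (List.perm_ext_iff_of_nodup (PySem.Set.nodup_ofList _) (PySem.Set.nodup_ofList _)).mpr
        (fun a => by
          rw [PySem.Set.mem_ofList, PySem.Set.mem_ofList]
          exact hpermg.mem_iff)
    · exact hgt.imp (fun h => neg_lt_neg h)
  have hmemks : ∀ k ∈ ks, k ∈ gs := by
    intro k hk
    rw [← hkeyeq] at hk
    exact (PySem.Set.mem_ofList _ _).mp hk
  have hcovks : ∀ x ∈ gs, x ∈ ks := by
    intro x hx
    rw [← hkeyeq]
    exact (PySem.Set.mem_ofList _ _).mpr hx
  -- A side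
  have hA : mapFitnessToRank population
      = ks.map (fun k => (k, [(gs.idxOf k : Int) + 1, (gs.count k : Int)])) := by
    rw [pvA_as_enum]
    have hkeys : ((PySem.List.enumerate gs 0).foldl pvAStep PySem.Dict.empty).keys
        = PySem.Set.ofList gs := by
      rw [pvAKeys, PySem.Dict.keys_empty, PySem.Set.ofList_eq_foldl]
    have hnd : ((PySem.List.enumerate gs 0).foldl pvAStep PySem.Dict.empty).keys.Nodup := by
      rw [hkeys]; exact PySem.Set.nodup_ofList gs
    rw [PySem.Dict.items_eq_map_keys _ hnd ([] : List Int), hkeys, hkeyeq]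
    apply List.map_congr_left
    intro k hk
    rw [pvAVal_new gs 0 PySem.Dict.empty k (PySem.Dict.contains_empty k) (hmemks k hk)]
    simp
  -- B side
  have hB : mapFitnessToRank_alt population = pvBuild (fun k => (gs.count k : Int)) ks 1 := by
    simp only [mapFitnessToRank_alt]
    rw [pvBCounts population, PySem.Dict.keys_counter]
    rw [pvBFold (fun f => (PySem.Dict.counter (population.map (fun row => PySem.List.pyGetD row 1 0))).getD f 0)
      _ _ _ (fun k _ => PySem.Dict.contains_empty k) hksnd]
    rw [show (PySem.Dict.empty : PySem.Dict Int (List Int)).items = [] from rfl, List.nil_append]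
    apply pvBuild_congr
    intro k hk
    rw [PySem.Dict.getD_counter]
    exact_mod_cast (hpermg.count_eq k).symm
  rw [hA, hB, pvFinal gs hdesc ks hksdesc hmemks hcovks]

-- ===== VERDICT (by name: the statement is the Claim_ definition above) =====
theorem mapFitnessToRank_spec : Claim_equal_mapFitnessToRank := by
  intro population _ _
  unfold Spec_mapFitnessToRank
  exact pvMain population
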